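-- pv_equiv track=rewrite | github.com/nicolasarcas/PBD_Atividade04 | exercicio_aula1.py | friends_by_gender
-- ===== SOURCE A (Python) =====
-- def friends_by_gender(user, gender):
--     f = 0
--     m = 0
--     #verificando cada amigo do usuario
--     for friend in  user['friends']:
--         #caso o gênero seja f o contador feminino aumenta
--         if friend['gender'] == 'f':
--             f+=1
--         #caso o gênero seja m o contador masculino aumenta
--         elif friend['gender'] == 'm':
--             m+=1
--     #a função retorna uma tupla com a quantidade de amigos de cada gênero
--     return (f,m)
-- ===== SOURCE B (Python) =====
-- def friends_by_gender(user, gender):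
--     # Staged passes: extract the gender column once, then count each value with list.count.
--     genders = [friend['gender'] for friend in user['friends']]
--     return (genders.count('f'), genders.count('m'))
-- ===== Notes on version B (the rewrite author's own statement) =====
-- stated objective: idiomatic
-- what changed: Replaces A's single pass with two int accumulators and if/elif branching by a staged decomposition: first extract the list of gender values, then obtain each tally with list.count ('f' pass, 'm' pass) - no accumulators and no branching logic remain.
import Mathlib
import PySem

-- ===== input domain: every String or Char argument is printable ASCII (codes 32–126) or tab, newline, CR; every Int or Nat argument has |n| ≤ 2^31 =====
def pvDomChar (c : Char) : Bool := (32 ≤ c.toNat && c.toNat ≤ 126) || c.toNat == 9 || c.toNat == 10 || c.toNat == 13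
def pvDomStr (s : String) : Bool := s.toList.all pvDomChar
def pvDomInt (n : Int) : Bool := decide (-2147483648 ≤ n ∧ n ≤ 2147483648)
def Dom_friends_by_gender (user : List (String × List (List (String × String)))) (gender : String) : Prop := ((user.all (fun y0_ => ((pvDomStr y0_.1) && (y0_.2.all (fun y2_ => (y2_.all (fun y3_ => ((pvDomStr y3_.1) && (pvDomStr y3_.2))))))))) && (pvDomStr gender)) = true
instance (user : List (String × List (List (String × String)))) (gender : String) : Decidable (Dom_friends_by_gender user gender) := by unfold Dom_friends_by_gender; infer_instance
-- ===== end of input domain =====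

-- B replaces A's single accumulator loop with if/elif branching by a staged decomposition:
-- extract the gender column once, then count 'f' and 'm' with list.count; same cost.

-- ===== PORT A =====
def friends_by_gender (user : List (String × List (List (String × String)))) (gender : String) : Int × Int :=
  match (PySem.Dict.mk user).get? "friends" with
  | none => (0, 0)  -- unreachable under Pre_ (Python: KeyError)
  | some friends =>
    friends.foldl (fun (fm : Int × Int) friend =>
      match (PySem.Dict.mk friend).get? "gender" with
      | none => fm  -- unreachable under Pre_ (Python: KeyError)
      | some g => if g = "f" then (fm.1 + 1, fm.2) else if g = "m" then (fm.1, fm.2 + 1) else fm)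
      (0, 0)

-- ===== PORT B =====
def friends_by_gender_alt (user : List (String × List (List (String × String)))) (gender : String) : Int × Int :=
  let genders := (((PySem.Dict.mk user).get? "friends").getD []).map
    (fun friend => ((PySem.Dict.mk friend).get? "gender").getD "")  -- getD unreachable under Pre_ (Python: KeyError)
  ((PySem.List.count genders "f" : Int), (PySem.List.count genders "m" : Int))

-- ===== PRECONDITION & SPEC =====
-- Pre_ excludes exactly the inputs where Python A raises KeyError: user lacking a
-- 'friends' key, or some friend dict lacking a 'gender' key.
def Pre_friends_by_gender (user : List (String × List (List (String × String)))) (gender : String) : Prop :=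
  (((PySem.Dict.mk user).get? "friends").isSome
    && (((PySem.Dict.mk user).get? "friends").getD []).all
         (fun friend => ((PySem.Dict.mk friend).get? "gender").isSome)) = true
instance (user : List (String × List (List (String × String)))) (gender : String) : Decidable (Pre_friends_by_gender user gender) := by unfold Pre_friends_by_gender; infer_instance

def pvWitness_friends_by_gender : (List (String × List (List (String × String)))) × String :=
  ([("friends", [[("gender", "f")], [("gender", "m")], [("gender", "x")]])], "f")

def Spec_friends_by_gender (user : List (String × List (List (String × String)))) (gender : String) (out : Int × Int) : Prop := out = friends_by_gender_alt user gender
instance (user : List (String × List (List (String × String)))) (gender : String) (out : Int × Int) : Decidable (Spec_friends_by_gender user gender out) := by unfold Spec_friends_by_gender; infer_instance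

-- ===== CLAIM =====
def Claim_equal_friends_by_gender : Prop := ∀ (user : List (String × List (List (String × String)))) (gender : String), Dom_friends_by_gender user gender → Pre_friends_by_gender user gender → Spec_friends_by_gender user gender (friends_by_gender user gender)

-- ===== LEMMAS AND PROOFS =====

-- A's loop computes (f-count, m-count) of the gender values, provided every friend has one.
lemma foldA_counts (fs : List (List (String × String))) (a b : Int)
    (h : ∀ fr ∈ fs, ((PySem.Dict.mk fr).get? "gender").isSome) :
    fs.foldl (fun (fm : Int × Int) friend =>
      match (PySem.Dict.mk friend).get? "gender" with
      | none => fm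
      | some g => if g = "f" then (fm.1 + 1, fm.2) else if g = "m" then (fm.1, fm.2 + 1) else fm)
      (a, b)
    = (a + ((fs.map (fun fr => ((PySem.Dict.mk fr).get? "gender").getD "")).count "f" : Int),
       b + ((fs.map (fun fr => ((PySem.Dict.mk fr).get? "gender").getD "")).count "m" : Int)) := by
  induction fs generalizing a b with
  | nil => simp
  | cons fr rest ih =>
    have hfr := h fr (by simp)
    obtain ⟨g, hg⟩ := Option.isSome_iff_exists.mp hfr
    have hrest : ∀ x ∈ rest, ((PySem.Dict.mk x).get? "gender").isSome := fun x hx => h x (by simp [hx])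
    simp only [List.foldl_cons, List.map_cons, hg, Option.getD_some]
    by_cases hf : g = "f"
    · subst hf
      rw [if_pos rfl, ih _ _ hrest, List.count_cons_self,
        List.count_cons_of_ne (show ("f":String) ≠ "m" by decide)]
      have : ∀ (x y c d : Int), x = c → y = d → (x, y) = (c, d) := by intro _ _ _ _ h1 h2; rw [h1, h2]
      exact this _ _ _ _ (by push_cast; ring) (by push_cast; ring)
    · rw [if_neg hf]
      by_cases hm : g = "m"
      · subst hm
        rw [if_pos rfl, ih _ _ hrest, List.count_cons_self,
          List.count_cons_of_ne (show ("m":String) ≠ "f" by decide)]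
        have : ∀ (x y c d : Int), x = c → y = d → (x, y) = (c, d) := by intro _ _ _ _ h1 h2; rw [h1, h2]
        exact this _ _ _ _ (by push_cast; ring) (by push_cast; ring)
      · rw [if_neg hm, ih _ _ hrest, List.count_cons_of_ne hf,
          List.count_cons_of_ne hm]

-- ===== VERDICT =====
theorem friends_by_gender_spec : Claim_equal_friends_by_gender := by
  intro user gender _ hpre
  unfold Pre_friends_by_gender at hpre
  simp only [Bool.and_eq_true, List.all_eq_true] at hpre
  obtain ⟨hsome, hall⟩ := hpre
  obtain ⟨fs, hfs⟩ := Option.isSome_iff_exists.mp hsome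
  unfold Spec_friends_by_gender friends_by_gender friends_by_gender_alt
  rw [hfs]
  simp only [Option.getD_some]
  rw [foldA_counts fs 0 0 (by intro fr hfr; exact hall fr (by rw [hfs] at hall ⊢; simpa using hfr))]
  simp [PySem.List.count]
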